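-- pv_equiv track=rewrite | github.com/Havmaagen/Competitive-programming | .ipynb_checkpoints/2559. Count Vowel Strings in Ranges-checkpoint.py | vowelStrings
-- ===== SOURCE A (Python) =====
-- def vowelStrings(words, queries):
--     """
--     :type words: List[str]
--     :type queries: List[List[int]]
--     :rtype: List[int]
--     """
--
--     vowels = {"a", "e", "i", "o", "u"}
--     n = len(words)
--     prefix = (n + 1) * [0]
--     for i, word in enumerate(words):
--         prefix[i + 1] = prefix[i]
--         if (word[0] in vowels) and (word[-1] in vowels):
--             prefix[i + 1] += 1
--
--     answer = [prefix[j + 1] - prefix[i] for i, j in queries]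
--
--     return answer
-- ===== SOURCE B (Python) =====
-- def vowelStrings(words, queries):
--     vowels = "aeiou"
--     ok = [1 if (w[0] in vowels and w[-1] in vowels) else 0 for w in words]
--     return [sum(ok[i:j + 1]) for i, j in queries]
-- ===== Notes on version B (the rewrite author's own statement) =====
-- stated objective: simpler
-- what changed: B drops A's prefix-sum table entirely: it precomputes a 0/1 flag per word and answers each query by summing the flag slice ok[i:j+1] directly, per-query rescanning instead of an indexed table with O(1) subtraction.
-- outside the precondition, e.g. on vowelStrings(['ae'], [[-1, -1]]): A returns [-1], B returns [0]; on vowelStrings(['ae', 'ia'], [[2, 0]]): A returns [-1], B returns [0]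
import Mathlib
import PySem

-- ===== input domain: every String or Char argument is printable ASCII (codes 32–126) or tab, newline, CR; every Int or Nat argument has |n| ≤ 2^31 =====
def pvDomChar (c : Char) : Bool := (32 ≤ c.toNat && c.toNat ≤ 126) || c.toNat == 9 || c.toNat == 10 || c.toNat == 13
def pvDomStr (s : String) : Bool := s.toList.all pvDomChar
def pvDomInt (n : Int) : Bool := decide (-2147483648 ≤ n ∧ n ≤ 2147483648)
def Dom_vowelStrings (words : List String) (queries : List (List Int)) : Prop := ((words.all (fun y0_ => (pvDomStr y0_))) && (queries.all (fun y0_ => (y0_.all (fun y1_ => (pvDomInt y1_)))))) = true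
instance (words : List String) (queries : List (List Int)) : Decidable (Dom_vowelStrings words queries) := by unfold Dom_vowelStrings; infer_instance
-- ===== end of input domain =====

-- B replaces A's prefix-sum table by a per-word 0/1 flag list and answers each query
-- by summing the flag slice ok[i:j+1] directly (simpler; no speed claim).

-- ===== PORT A =====
def pvVowelA (c : Char) : Bool := c == 'a' || c == 'e' || c == 'i' || c == 'o' || c == 'u'

-- '(word[0] in vowels) and (word[-1] in vowels)'; pyGet? = none is Python's IndexError (empty word, excluded by Pre_)
def pvGoodA (w : String) : Bool :=
  (match PySem.List.pyGet? w.toList 0 with | some c => pvVowelA c | none => false)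
  && (match PySem.List.pyGet? w.toList (-1) with | some c => pvVowelA c | none => false)

-- loop body: prefix[i+1] = prefix[i]; if good: prefix[i+1] += 1
def pvStepA (p : List Int) (iw : Int × String) : List Int :=
  let p1 := PySem.List.pySetD p (iw.1 + 1) (PySem.List.pyGetD p iw.1 0)
  if pvGoodA iw.2 then PySem.List.pySetD p1 (iw.1 + 1) (PySem.List.pyGetD p1 (iw.1 + 1) 0 + 1) else p1

def vowelStrings (words : List String) (queries : List (List Int)) : List Int :=
  -- n = len(words); prefix = the table built by the loop (mutation ported as foldl over pySetD)
  queries.map (fun q => match q with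
    | [i, j] =>
        PySem.List.pyGetD ((PySem.List.enumerate words 0).foldl pvStepA (List.replicate (words.length + 1) 0)) (j + 1) 0
          - PySem.List.pyGetD ((PySem.List.enumerate words 0).foldl pvStepA (List.replicate (words.length + 1) 0)) i 0
    | _ => 0)  -- a query that is not a pair raises ValueError in Python (excluded by Pre_)

-- ===== PORT B =====
def pvOkB (w : String) : Int :=
  if ((match PySem.List.pyGet? w.toList 0 with | some c => "aeiou".toList.contains c | none => false)
      && (match PySem.List.pyGet? w.toList (-1) with | some c => "aeiou".toList.contains c | none => false))
  then 1 else 0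

-- answer for one query [i, j]: sum(ok[i:j+1])
def pvAnsB (ok : List Int) : List Int → Int
  | [i, j] => (PySem.List.slice ok (some i) (some (j + 1))).sum
  | [] => 0      -- a query that does not unpack as 'i, j' raises ValueError in Python (excluded by Pre_)
  | [_] => 0
  | _ :: _ :: _ :: _ => 0

def vowelStrings_alt (words : List String) (queries : List (List Int)) : List Int :=
  -- ok = the 0/1 flag list; each query sums the slice ok[i:j+1]
  queries.map (pvAnsB (words.map pvOkB))

-- ===== PRECONDITION & SPEC =====
-- Pre_ admits nonempty words with queries [i, j] in the problem's canonical range 0 ≤ i ≤ j+1 ≤ len(words),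
-- and additionally, when no word is vowel-bounded (both programs then answer 0 to everything), any query on
-- which A does not raise.  A raises IndexError on an empty word or a prefix-table index outside [-(n+1), n]
-- and ValueError on a query that is not a pair; the remaining excluded queries (negative or reversed
-- endpoints with at least one vowel-bounded word present) are ones where A's value is a Python
-- negative-index-wraparound / reversed-range artifact of the prefix table that neither reading of the task
-- specifies, and B's slice sum differs there (see the cites in the claim).
def pvVow (c : Char) : Bool := c == 'a' || c == 'e' || c == 'i' || c == 'o' || c == 'u'

def pvVowelBounded (w : String) : Bool :=
  (w.toList.head?.any pvVow) && (w.toList.getLast?.any pvVow)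

-- a query in the problem's canonical range: 0 ≤ i ≤ j + 1 ≤ n
def pvQueryOk (n : Nat) (q : List Int) : Bool :=
  q.length == 2 && decide (0 ≤ q.getD 0 0 ∧ q.getD 0 0 ≤ q.getD 1 0 + 1 ∧ q.getD 1 0 < (n : Int))

-- a query on which A merely does not raise: both prefix-table indices i and j+1 in [-(n+1), n]
def pvQueryIn (n : Nat) (q : List Int) : Bool :=
  q.length == 2 && decide (-(n : Int) - 1 ≤ q.getD 0 0 ∧ q.getD 0 0 ≤ (n : Int) ∧
    -(n : Int) - 1 ≤ q.getD 1 0 + 1 ∧ q.getD 1 0 + 1 ≤ (n : Int))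

def Pre_vowelStrings (words : List String) (queries : List (List Int)) : Prop :=
  ((words.all (fun w => !w.toList.isEmpty)) &&
   (queries.all (fun q => pvQueryOk words.length q ||
      ((words.all (fun w => !pvVowelBounded w)) && pvQueryIn words.length q)))) = true
instance (words : List String) (queries : List (List Int)) : Decidable (Pre_vowelStrings words queries) := by
  unfold Pre_vowelStrings; infer_instance

def pvWitness_vowelStrings : List String × List (List Int) := (["ae", "b", "uo"], [[0, 2], [1, 1], [0, 0]])

def Spec_vowelStrings (words : List String) (queries : List (List Int)) (out : List Int) : Prop := out = vowelStrings_alt words queries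
instance (words : List String) (queries : List (List Int)) (out : List Int) : Decidable (Spec_vowelStrings words queries out) := by unfold Spec_vowelStrings; infer_instance

-- ===== CLAIM (what is proved, stated in full; the proofs are below) =====
def Claim_equal_vowelStrings : Prop := ∀ (words : List String) (queries : List (List Int)), Dom_vowelStrings words queries → Pre_vowelStrings words queries → Spec_vowelStrings words queries (vowelStrings words queries)

-- ===== LEMMAS AND PROOFS =====

def pvFlag (w : String) : Int := if pvGoodA w then 1 else 0

def pvPartials (a : Int) : List String → List Int
  | [] => []
  | w :: ws => (a + pvFlag w) :: pvPartials (a + pvFlag w) ws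

theorem pv_set_append_len (pre t : List Int) (y v : Int) :
    (pre ++ y :: t).set pre.length v = pre ++ v :: t := by
  induction pre with
  | nil => rfl
  | cons x xs ih => simp [ih]

theorem pv_getD_append_len (pre t : List Int) (y : Int) :
    (pre ++ y :: t).getD pre.length 0 = y := by
  induction pre with
  | nil => rfl
  | cons x xs ih => simpa using ih

theorem pv_getD_append_lt (pre t : List Int) (k : Nat) (h : k < pre.length) :
    (pre ++ t).getD k 0 = pre.getD k 0 := by
  simp [List.getD, List.getElem?_append_left h]

theorem pv_stepA_eq (pre t : List Int) (s : Nat) (w : String) (h : pre.length = s + 1) :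
    pvStepA (pre ++ (0 : Int) :: t) ((s : Int), w) = pre ++ (pre.getD s 0 + pvFlag w) :: t := by
  have hidx : ((s : Int) + 1) = ((pre.length : Nat) : Int) := by omega
  have hget : PySem.List.pyGetD (pre ++ (0 : Int) :: t) (s : Int) 0 = pre.getD s 0 := by
    rw [PySem.List.pyGetD_natCast]
    exact pv_getD_append_lt pre _ s (by omega)
  unfold pvStepA pvFlag
  simp only [hidx, hget, PySem.List.pySetD_natCast, PySem.List.pyGetD_natCast]
  rw [pv_set_append_len]
  by_cases hg : pvGoodA w
  · simp [hg]
  · simp [hg]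

theorem pv_loopA (ws : List String) (s : Nat) (pre : List Int) (h : pre.length = s + 1) :
    (PySem.List.enumerate ws (s : Int)).foldl pvStepA (pre ++ List.replicate ws.length 0)
      = pre ++ pvPartials (pre.getD s 0) ws := by
  induction ws generalizing s pre with
  | nil => simp [PySem.List.enumerate, pvPartials]
  | cons w ws ih =>
    simp only [PySem.List.enumerate_cons, List.foldl_cons, List.length_cons, List.replicate_succ]
    rw [pv_stepA_eq pre _ s w h]
    have hlen : (pre ++ [pre.getD s 0 + pvFlag w]).length = (s + 1) + 1 := by simp [h]
    have hrec := ih (s + 1) (pre ++ [pre.getD s 0 + pvFlag w]) hlen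
    have hcast : ((s : Int) + 1) = (((s + 1 : Nat)) : Int) := by push_cast; ring
    have hassoc : pre ++ (pre.getD s 0 + pvFlag w) :: List.replicate ws.length 0
        = (pre ++ [pre.getD s 0 + pvFlag w]) ++ List.replicate ws.length 0 := by simp
    rw [hassoc, hcast, hrec]
    have hgd : (pre ++ [pre.getD s 0 + pvFlag w]).getD (s + 1) 0 = pre.getD s 0 + pvFlag w := by
      rw [show s + 1 = pre.length from by omega]
      exact pv_getD_append_len pre ([] : List Int) (pre.getD s 0 + pvFlag w)
    rw [hgd]
    simp [pvPartials]

theorem pv_partials_getD (ws : List String) (a : Int) (k : Nat) (hk : k ≤ ws.length) :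
    (a :: pvPartials a ws).getD k 0 = a + ((ws.take k).map pvFlag).sum := by
  induction ws generalizing a k with
  | nil =>
    have hk0 : k = 0 := Nat.le_zero.mp (by simpa using hk)
    subst hk0
    simp
  | cons w ws ih =>
    cases k with
    | zero => simp
    | succ k =>
      have hk' : k ≤ ws.length := by simpa using hk
      have := ih (a + pvFlag w) k hk'
      simp only [pvPartials, List.getD, List.getElem?_cons_succ] at *
      simp [this, List.take_succ_cons]
      ring

theorem pv_sum_drop_take (l : List Int) (a b : Nat) (hab : a ≤ b) :
    ((l.drop a).take (b - a)).sum = (l.take b).sum - (l.take a).sum := by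
  have h : l.take b = l.take a ++ (l.drop a).take (b - a) := by
    rw [← List.take_add]
    congr 1
    omega
  rw [h, List.sum_append]
  ring

theorem pv_good_eq (w : String) : pvGoodA w = pvVowelBounded w := by
  unfold pvGoodA pvVowelBounded
  rw [show PySem.List.pyGet? w.toList 0 = w.toList[0]? from PySem.List.pyGet?_zero w.toList,
    PySem.List.pyGet?_neg_one]
  rw [← List.head?_eq_getElem?]
  cases h0 : w.toList.head? <;> cases h1 : w.toList.getLast? <;>
    simp [pvVowelA, pvVow]

theorem pv_partials_zero (ws : List String) (a : Int) (h : ∀ w ∈ ws, pvFlag w = 0) :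
    pvPartials a ws = List.replicate ws.length a := by
  induction ws generalizing a with
  | nil => rfl
  | cons w ws ih =>
    have hw : pvFlag w = 0 := h w (by simp)
    simp [pvPartials, hw, ih a (fun w hw => h w (by simp [hw])), List.replicate_succ]

theorem pv_pyGetD_zero (n : Nat) (x : Int) :
    PySem.List.pyGetD ((0 : Int) :: List.replicate n 0) x 0 = 0 := by
  by_cases h : PySem.Raise.InRange ((0 : Int) :: List.replicate n (0 : Int)).length x
  · have hmem := PySem.List.pyGetD_mem ((0 : Int) :: List.replicate n 0) (i := x) 0 h
    rcases List.mem_cons.mp hmem with h0 | h0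
    · exact h0
    · exact List.eq_of_mem_replicate h0
  · exact PySem.List.pyGetD_of_none _ _ _ ((PySem.List.pyGet?_eq_none_iff _ _).mpr h)

theorem pv_sum_slice_replicate (n : Nat) (a b : Option Int) :
    (PySem.List.slice (List.replicate n (0 : Int)) a b).sum = 0 := by
  apply List.sum_eq_zero
  intro x hx
  exact List.eq_of_mem_replicate (PySem.List.mem_of_mem_slice _ a b hx)

theorem pv_okB_eq (w : String) : pvOkB w = pvFlag w := by
  unfold pvOkB pvFlag pvGoodA
  cases h0 : PySem.List.pyGet? w.toList 0 <;>
    cases h1 : PySem.List.pyGet? w.toList (-1) <;>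
      simp [pvVowelA, or_assoc]

-- ===== VERDICT (by name: the statement is the Claim_ definition above) =====
theorem vowelStrings_spec : Claim_equal_vowelStrings := by
  intro words queries _ hpre
  unfold Pre_vowelStrings at hpre
  rw [Bool.and_eq_true, List.all_eq_true, List.all_eq_true] at hpre
  obtain ⟨-, hq⟩ := hpre
  unfold Spec_vowelStrings vowelStrings vowelStrings_alt
  have hrep : List.replicate (words.length + 1) (0 : Int)
      = [(0 : Int)] ++ List.replicate words.length 0 := rfl
  have hloop := pv_loopA words 0 [(0 : Int)] (by simp)
  rw [show ((0 : Nat) : Int) = (0 : Int) from rfl, ← hrep] at hloop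
  have hok : words.map pvOkB = words.map pvFlag := by
    simp [pv_okB_eq]
  rw [hloop, hok]
  apply List.map_congr_left
  intro q hq'
  have hqt := hq q hq'
  match q with
  | [] => simp [pvQueryOk, pvQueryIn] at hqt
  | [_] => simp [pvQueryOk, pvQueryIn] at hqt
  | (_ :: _ :: _ :: _) => simp [pvQueryOk, pvQueryIn] at hqt
  | [i, j] =>
    have hgd : ([(0 : Int)] ++ pvPartials ([(0 : Int)].getD 0 0) words)
        = (0 : Int) :: pvPartials 0 words := by simp
    rw [hgd]
    show PySem.List.pyGetD ((0 : Int) :: pvPartials 0 words) (j + 1) 0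
          - PySem.List.pyGetD ((0 : Int) :: pvPartials 0 words) i 0
        = pvAnsB (List.map pvFlag words) [i, j]
    rw [show pvAnsB (List.map pvFlag words) [i, j]
        = (PySem.List.slice (List.map pvFlag words) (some i) (some (j + 1))).sum from rfl]
    rw [Bool.or_eq_true] at hqt
    rcases hqt with hqt | hqt
    · -- canonical range 0 ≤ i ≤ j+1 ≤ n
      simp only [pvQueryOk, Bool.and_eq_true, decide_eq_true_eq] at hqt
      obtain ⟨-, hi, hij, hj⟩ := hqt
      simp only [List.getD_cons_zero, List.getD_cons_succ] at hi hij hj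
      have hj1 : (0 : Int) ≤ j + 1 := by omega
      have hiN : i = ((i.toNat : Nat) : Int) := (Int.toNat_of_nonneg hi).symm
      have hjN : j + 1 = (((j + 1).toNat : Nat) : Int) := (Int.toNat_of_nonneg hj1).symm
      have hile : i.toNat ≤ words.length := by omega
      have hjle : (j + 1).toNat ≤ words.length := by omega
      have hab : i.toNat ≤ (j + 1).toNat := by omega
      rw [hiN, hjN, PySem.List.pyGetD_natCast, PySem.List.pyGetD_natCast,
        PySem.List.slice_natCast,
        pv_partials_getD words 0 (j + 1).toNat hjle,
        pv_partials_getD words 0 i.toNat hile,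
        pv_sum_drop_take (words.map pvFlag) i.toNat (j + 1).toNat hab]
      simp [List.map_take]
    · -- no vowel-bounded word: every flag is 0, both sides are 0
      rw [Bool.and_eq_true, List.all_eq_true] at hqt
      obtain ⟨hng, -⟩ := hqt
      have hflags : ∀ w ∈ words, pvFlag w = 0 := by
        intro w hw
        have := hng w hw
        rw [Bool.not_eq_eq_eq_not, Bool.not_true] at this
        simp [pvFlag, pv_good_eq, this]
      have hmap : words.map pvFlag = List.replicate words.length (0 : Int) := by
        rw [List.eq_replicate_iff]
        constructor
        · simp
        · intro x hx
          obtain ⟨w, hw, rfl⟩ := List.mem_map.mp hx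
          exact hflags w hw
      rw [pv_partials_zero words 0 hflags, hmap,
        pv_pyGetD_zero words.length (j + 1), pv_pyGetD_zero words.length i,
        pv_sum_slice_replicate words.length (some i) (some (j + 1))]
      simp
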